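-- pv_equiv track=rewrite | github.com/JoaoNunoAbreu/advent-of-code | 2015/day01/main.py | part2
-- ===== SOURCE A (Python) =====
-- def part2(lines):
--     index = 0
--     sequence = lines[0]
--     floor = 0
--     for i in sequence:
--         if i == '(':
--             floor += 1
--         else:
--             floor -= 1
--         index += 1
--         if floor == -1:
--             return index
--     return floor
-- ===== SOURCE B (Python) =====
-- def part2(lines):
--     # Pass 1: build the full prefix-sum table of the floor after each paren.
--     prefixes = []
--     total = 0
--     for c in lines[0]:
--         total += 1 if c == '(' else -1
--         prefixes.append(total)
--     # Pass 2: first 1-based position where the floor is -1; else the final floor.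
--     for i, f in enumerate(prefixes, 1):
--         if f == -1:
--             return i
--     return total
-- ===== Notes on version B (the rewrite author's own statement) =====
-- stated objective: alternative
-- what changed: A's fused scan with early return is split into two passes: build the full prefix-sum table of floors, then search it for the first -1 (falling back to the final total).
import Mathlib
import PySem

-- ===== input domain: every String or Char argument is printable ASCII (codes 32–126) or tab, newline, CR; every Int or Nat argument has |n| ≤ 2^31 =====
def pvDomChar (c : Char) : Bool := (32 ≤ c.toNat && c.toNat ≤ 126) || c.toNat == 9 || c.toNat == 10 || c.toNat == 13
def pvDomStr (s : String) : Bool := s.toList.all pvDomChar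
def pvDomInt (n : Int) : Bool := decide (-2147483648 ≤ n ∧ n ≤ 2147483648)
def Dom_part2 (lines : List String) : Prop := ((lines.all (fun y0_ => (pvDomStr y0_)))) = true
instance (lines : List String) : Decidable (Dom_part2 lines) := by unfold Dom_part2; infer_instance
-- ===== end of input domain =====

-- B splits A's fused early-return scan into a build-prefix-table pass plus a search pass (objective: alternative).
-- Pre_ excludes the empty list, on which both Pythons raise IndexError at lines[0].

-- ===== PORT A =====
def part2Loop : List Char → Int → Int → Int
  | [], _, floor => floor
  | c :: rest, index, floor =>
    let floor' := if c = '(' then floor + 1 else floor - 1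
    if floor' = -1 then index + 1 else part2Loop rest (index + 1) floor'

def part2 (lines : List String) : Int :=
  part2Loop (lines.headD "").toList 0 0

-- ===== PORT B =====
-- first pass of Source B: prefix-sum table together with the final total
def buildPrefix : List Char → Int → List Int × Int
  | [], total => ([], total)
  | c :: rest, total =>
    let t := total + (if c = '(' then 1 else -1)
    let r := buildPrefix rest t
    (t :: r.1, r.2)

-- second pass of Source B: enumerate(prefixes, 1), first index with floor -1
def findNegOne : List Int → Int → Option Int
  | [], _ => none
  | f :: fs, i => if f = -1 then some i else findNegOne fs (i + 1)

def part2_alt (lines : List String) : Int :=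
  let r := buildPrefix (lines.headD "").toList 0
  match findNegOne r.1 1 with
  | some i => i
  | none => r.2

-- ===== PRECONDITION & SPEC =====
-- lines[0] raises IndexError on the empty list in both programs
def Pre_part2 (lines : List String) : Prop := lines ≠ []
instance (lines : List String) : Decidable (Pre_part2 lines) := by unfold Pre_part2; infer_instance
def pvWitness_part2 : List String := ["(())))"]
def Spec_part2 (lines : List String) (out : Int) : Prop := out = part2_alt lines
instance (lines : List String) (out : Int) : Decidable (Spec_part2 lines out) := by unfold Spec_part2; infer_instance

-- ===== CLAIM (what is proved, stated in full; the proofs are below) =====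
def Claim_equal_part2 : Prop := ∀ (lines : List String), Dom_part2 lines → Pre_part2 lines → Spec_part2 lines (part2 lines)

-- ===== LEMMAS AND PROOFS =====
theorem loop_eq_table : ∀ (cs : List Char) (index floor : Int),
    part2Loop cs index floor =
      (match findNegOne (buildPrefix cs floor).1 (index + 1) with
       | some i => i
       | none => (buildPrefix cs floor).2) := by
  intro cs
  induction cs with
  | nil => intro index floor; simp [part2Loop, buildPrefix, findNegOne]
  | cons c rest ih =>
    intro index floor
    simp only [part2Loop, buildPrefix, findNegOne]
    by_cases h : (if c = '(' then floor + 1 else floor - 1) = -1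
    · have h' : floor + (if c = '(' then 1 else -1) = -1 := by split_ifs at h ⊢ <;> omega
      simp [h, h']
    · have h' : ¬ floor + (if c = '(' then 1 else -1) = -1 := by split_ifs at h ⊢ <;> omega
      have he : (if c = '(' then floor + 1 else floor - 1) = floor + (if c = '(' then 1 else -1) := by
        split_ifs <;> omega
      simp [h', ih, he, add_assoc]

-- ===== VERDICT (by name: the statement is the Claim_ definition above) =====
theorem part2_spec : Claim_equal_part2 := by
  intro lines _ _
  unfold Spec_part2 part2 part2_alt
  simpa using loop_eq_table (lines.headD "").toList 0 0
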